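-- pv_equiv track=rewrite | github.com/Shivam-baghel/Python_Scaler | 2. Data Structures and Algorithm/2.Advance/52. Dynamic Programming - Problems/Homework/Q1.Dearest_nearest_cell.py | nearestCell
-- ===== SOURCE A (Python) =====
-- from collections import deque
--
-- def nearestCell(grid):
--     N, M = len(grid), len(grid[0])
--
--     visited = [[False] * M for _ in range(N)]
--
--     q = deque()
--
--     for i in range(N):
--         for j in range(M):
--             # we are appending all the Ones intially in Queue
--             if grid[i][j] == 1:
--                 visited[i][j] = True
--                 q.append((i, j, 0))
--                 grid[i][j] = 0  # make it zero
--
--     directions = [[1, 0], [0, 1], [-1, 0], [0, -1]]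
--
--     while q:
--         row, col, count = q.popleft()
--
--         for i, j in directions:
--             cr = row + i
--             cc = col + j
--
--             if (
--                 cr < 0
--                 or cc < 0
--                 or cr >= N
--                 or cc >= M
--                 or visited[cr][cc]
--                 or grid[cr][cc] != 0
--             ):
--                 continue
--
--             grid[cr][cc] = count + 1
--             visited[cr][cc] = True
--             q.append((cr, cc, count + 1))
--
--     return grid
-- ===== SOURCE B (Python) =====
-- def nearestCell(grid):
--     # Level-synchronous BFS over a distance dictionary; grid is written back in place
--     # at the end (same return object; cells never reached keep their original value).
--     N, M = len(grid), len(grid[0])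
--     dist = {}
--     frontier = [(i, j) for i in range(N) for j in range(M) if grid[i][j] == 1]
--     for cell in frontier:
--         dist[cell] = 0
--     d = 0
--     while frontier:
--         d += 1
--         nxt = []
--         for r, c in frontier:
--             for nr, nc in ((r + 1, c), (r, c + 1), (r - 1, c), (r, c - 1)):
--                 if 0 <= nr < N and 0 <= nc < M and (nr, nc) not in dist and grid[nr][nc] == 0:
--                     dist[(nr, nc)] = d
--                     nxt.append((nr, nc))
--         frontier = nxt
--     for (i, j), v in dist.items():
--         grid[i][j] = v
--     return grid
-- ===== Notes on version B (the rewrite author's own statement) =====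
-- stated objective: alternative
-- what changed: Replaces the deque-of-(row,col,count) BFS with visited matrix and in-place grid writes by a level-synchronous BFS that keeps per-level frontier lists and a distance dictionary, writing all distances back into the grid in one final pass.
import Mathlib
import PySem

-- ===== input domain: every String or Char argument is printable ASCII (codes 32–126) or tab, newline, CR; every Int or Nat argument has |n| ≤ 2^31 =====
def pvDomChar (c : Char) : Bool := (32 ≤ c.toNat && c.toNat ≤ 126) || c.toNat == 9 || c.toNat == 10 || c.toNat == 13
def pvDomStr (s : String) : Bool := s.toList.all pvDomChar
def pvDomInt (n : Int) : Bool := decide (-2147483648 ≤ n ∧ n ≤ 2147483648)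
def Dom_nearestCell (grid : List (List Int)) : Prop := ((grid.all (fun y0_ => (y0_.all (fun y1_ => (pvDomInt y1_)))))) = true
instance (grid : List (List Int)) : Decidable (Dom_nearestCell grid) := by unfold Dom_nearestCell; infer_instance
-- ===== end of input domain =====

-- B replaces A's deque-of-triples BFS (visited matrix, in-place grid writes during the search) by a
-- level-synchronous BFS over a distance dictionary with one final write-back pass; both Pythons
-- mutate `grid` in place and return it — the equivalence proved here is about the return value.

-- ===== PORT A =====
-- shared 2-d accessors; the `getD` defaults are junk values only reached where the
-- Python would raise (all Python accesses here are bounds-checked / inside an N×M matrix)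
def pvGGet (g : List (List Int)) (i j : Int) : Int :=
  (PySem.List.pyGet? ((PySem.List.pyGet? g i).getD []) j).getD 0

def pvGSet (g : List (List Int)) (i j v : Int) : List (List Int) :=
  g.set i.toNat ((g.getD i.toNat []).set j.toNat v)

def pvVisGet (vis : List (List Bool)) (i j : Int) : Bool :=
  (PySem.List.pyGet? ((PySem.List.pyGet? vis i).getD []) j).getD true

def pvVisSet (vis : List (List Bool)) (i j : Int) : List (List Bool) :=
  vis.set i.toNat ((vis.getD i.toNat []).set j.toNat true)

-- number of `False` entries of the visited matrix (termination measure for A's while-loop)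
def pvUnv (vis : List (List Bool)) : Nat := (vis.map (fun r => r.count false)).sum

def pvDirs : List (Int × Int) := [(1, 0), (0, 1), (-1, 0), (0, -1)]

-- body of A's `for i, j in directions` loop; state = (visited, grid, cells appended to q)
def pvStepDir (N M r c cnt : Int)
    (s : List (List Bool) × List (List Int) × List (Int × Int × Int)) (dv : Int × Int) :
    List (List Bool) × List (List Int) × List (Int × Int × Int) :=
  let cr := r + dv.1
  let cc := c + dv.2
  if cr < 0 ∨ cc < 0 ∨ N ≤ cr ∨ M ≤ cc ∨ pvVisGet s.1 cr cc = true ∨ pvGGet s.2.1 cr cc ≠ 0 then s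
  else (pvVisSet s.1 cr cc, pvGSet s.2.1 cr cc (cnt + 1), s.2.2 ++ [(cr, cc, cnt + 1)])

-- A's while-loop over the deque of (row, col, count); the Nat argument is a fuel
-- guard making the recursion structural: it is called with 4*pvUnv+|queue|, which
-- strictly dominates the number of pops, so the 0-guard is never reached.
def pvBfsA (N M : Int) : Nat → List (Int × Int × Int) → List (List Bool) → List (List Int) → List (List Int)
  | _, [], _, g => g
  | 0, _ :: _, _, g => g
  | fuel + 1, (r, c, cnt) :: rest, vis, g =>
      let s := pvDirs.foldl (pvStepDir N M r c cnt) (vis, g, [])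
      pvBfsA N M fuel (rest ++ s.2.2) s.1 s.2.1

-- A's initial double loop collecting the ones
def pvInitA (N M : Int) (st : List (List Bool) × List (Int × Int × Int) × List (List Int)) :
    List (List Bool) × List (Int × Int × Int) × List (List Int) :=
  (PySem.List.pyRange 0 N 1).foldl (fun st i =>
    (PySem.List.pyRange 0 M 1).foldl (fun st j =>
      if pvGGet st.2.2 i j == 1 then
        (pvVisSet st.1 i j, st.2.1 ++ [(i, j, (0 : Int))], pvGSet st.2.2 i j 0)
      else st) st) st

def nearestCell (grid : List (List Int)) : List (List Int) :=
  let N : Int := grid.length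
  let M : Int := (((PySem.List.pyGet? grid 0).getD []).length : Int)
  let vis0 := List.replicate grid.length (List.replicate ((PySem.List.pyGet? grid 0).getD []).length false)
  let st := pvInitA N M (vis0, [], grid)
  pvBfsA N M (4 * pvUnv st.1 + st.2.1.length) st.2.1 st.1 st.2.2

-- ===== PORT B =====
-- one neighbour test of B: state = (dist dictionary, next frontier)
def pvStepDirB (N M : Int) (grid : List (List Int)) (dd : Int)
    (s : PySem.Dict (Int × Int) Int × List (Int × Int)) (nb : Int × Int) :
    PySem.Dict (Int × Int) Int × List (Int × Int) :=
  if 0 ≤ nb.1 ∧ nb.1 < N ∧ 0 ≤ nb.2 ∧ nb.2 < M ∧ s.1.contains nb = false ∧ pvGGet grid nb.1 nb.2 = 0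
  then (s.1.insert nb dd, s.2 ++ [nb]) else s

-- B's `for r, c in frontier: for nr, nc in …` body
def pvExpandB (N M : Int) (grid : List (List Int)) (dd : Int)
    (s : PySem.Dict (Int × Int) Int × List (Int × Int)) (cell : Int × Int) :
    PySem.Dict (Int × Int) Int × List (Int × Int) :=
  [(cell.1 + 1, cell.2), (cell.1, cell.2 + 1), (cell.1 - 1, cell.2), (cell.1, cell.2 - 1)].foldl
    (pvStepDirB N M grid dd) s

-- termination measure for B's while-loop: zero cells of the (never mutated) grid not yet in dist
def pvZero (grid : List (List Int)) (N M : Int) : List (Int × Int) :=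
  (PySem.List.pyRange 0 N 1).flatMap (fun i =>
    ((PySem.List.pyRange 0 M 1).filter (fun j => pvGGet grid i j == 0)).map (fun j => (i, j)))

def pvPot (grid : List (List Int)) (N M : Int) (dist : PySem.Dict (Int × Int) Int) : Nat :=
  ((pvZero grid N M).filter (fun c => ! dist.contains c)).length

-- B's while-loop: one recursive call per BFS level; fuel guard as for A (a level
-- with a nonempty next frontier strictly shrinks pvPot, so pvPot+1 levels suffice).
def pvBfsB (N M : Int) (grid : List (List Int)) :
    Nat → List (Int × Int) → Int → PySem.Dict (Int × Int) Int → PySem.Dict (Int × Int) Int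
  | _, [], _, dist => dist
  | 0, _ :: _, _, dist => dist
  | fuel + 1, f :: fs, d, dist =>
      let dd := d + 1
      let s := (f :: fs).foldl (pvExpandB N M grid dd) (dist, [])
      pvBfsB N M grid fuel s.2 dd s.1

-- B's source comprehension
def pvSources (N M : Int) (grid : List (List Int)) : List (Int × Int) :=
  (PySem.List.pyRange 0 N 1).flatMap (fun i =>
    ((PySem.List.pyRange 0 M 1).filter (fun j => pvGGet grid i j == 1)).map (fun j => (i, j)))

-- B's final write-back loop (grid[i][j] = v for each item)
def pvWrite (g : List (List Int)) (items : List ((Int × Int) × Int)) : List (List Int) :=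
  items.foldl (fun g p => pvGSet g p.1.1 p.1.2 p.2) g

def nearestCell_alt (grid : List (List Int)) : List (List Int) :=
  let N : Int := grid.length
  let M : Int := (((PySem.List.pyGet? grid 0).getD []).length : Int)
  let frontier := pvSources N M grid
  let dist0 := frontier.foldl (fun d c => d.insert c (0 : Int)) PySem.Dict.empty
  let dist := pvBfsB N M grid (pvPot grid N M dist0 + 1) frontier 0 dist0
  pvWrite grid dist.items

-- ===== PRECONDITION & SPEC =====
-- Pre_ excludes exactly the inputs on which the Python A raises IndexError: the empty grid
-- (grid[0]) and grids with a row shorter than row 0 (grid[i][j] for j < len(grid[0])).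
def Pre_nearestCell (grid : List (List Int)) : Prop :=
  grid ≠ [] ∧ ∀ row ∈ grid, grid.headI.length ≤ row.length
instance (grid : List (List Int)) : Decidable (Pre_nearestCell grid) := by
  unfold Pre_nearestCell; infer_instance

def pvWitness_nearestCell : List (List Int) := [[1, 0], [0, 0]]

def Spec_nearestCell (grid : List (List Int)) (out : List (List Int)) : Prop := out = nearestCell_alt grid
instance (grid : List (List Int)) (out : List (List Int)) : Decidable (Spec_nearestCell grid out) := by
  unfold Spec_nearestCell; infer_instance

-- ===== CLAIM (what is proved, stated in full; the proofs are below) =====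
def Claim_equal_nearestCell : Prop :=
  ∀ (grid : List (List Int)), Dom_nearestCell grid → Pre_nearestCell grid →
    Spec_nearestCell grid (nearestCell grid)

-- ===== LEMMAS AND PROOFS =====

-- the simulation invariant between A's (visited, grid) state and B's dist dictionary
def pvInv (N M : Int) (g0 : List (List Int)) (vis : List (List Bool))
    (dist : PySem.Dict (Int × Int) Int) (g : List (List Int)) : Prop :=
  vis.length = N.toNat ∧ (∀ row ∈ vis, row.length = M.toNat) ∧
  (∀ i j : Int, 0 ≤ i → i < N → 0 ≤ j → j < M → pvVisGet vis i j = dist.contains (i, j)) ∧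
  g = pvWrite g0 dist.items ∧
  (∀ k ∈ dist.keys, 0 ≤ k.1 ∧ k.1 < N ∧ 0 ≤ k.2 ∧ k.2 < M)

-- measure lemmas: 4*pvUnv+|queue| strictly decreases across one pop of A's loop
theorem pv_foldl_mono {α γ : Type} (μ : α → Nat) (f : α → γ → α)
    (h : ∀ a x, μ (f a x) ≤ μ a) : ∀ (l : List γ) (a : α), μ (l.foldl f a) ≤ μ a := by
  intro l
  induction l with
  | nil => intro a; exact Nat.le_refl _
  | cons x xs ih => intro a; exact Nat.le_trans (ih (f a x)) (h a x)

theorem pvVisGet_false_exists (vis : List (List Bool)) (i j : Int)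
    (hi : 0 ≤ i) (hj : 0 ≤ j) (h : pvVisGet vis i j = false) :
    ∃ row, vis[i.toNat]? = some row ∧ row[j.toNat]? = some false := by
  unfold pvVisGet at h
  rw [PySem.List.pyGet?_of_nonneg vis hi] at h
  cases hrow : vis[i.toNat]? with
  | none =>
    rw [hrow] at h
    simp only [Option.getD_none] at h
    rw [PySem.List.pyGet?_of_nonneg ([] : List Bool) hj] at h
    simp at h
  | some row =>
    rw [hrow] at h
    simp only [Option.getD_some] at h
    rw [PySem.List.pyGet?_of_nonneg row hj] at h
    cases hb : row[j.toNat]? with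
    | none => rw [hb] at h; simp at h
    | some b =>
      rw [hb] at h
      simp only [Option.getD_some] at h
      refine ⟨row, rfl, ?_⟩
      rw [hb, h]

theorem pv_count_false_set : ∀ (row : List Bool) (j : Nat), row[j]? = some false →
    (row.set j true).count false + 1 = row.count false := by
  intro row
  induction row with
  | nil => intro j h; simp at h
  | cons b t ih =>
    intro j h
    cases j with
    | zero =>
      simp only [List.getElem?_cons_zero, Option.some.injEq] at h
      subst h
      simp [List.count_cons]
    | succ n =>
      simp only [List.getElem?_cons_succ] at h
      have := ih n h
      simp only [List.set_cons_succ, List.count_cons]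
      omega

theorem pvUnv_set : ∀ (vis : List (List Bool)) (n : Nat) (row row' : List Bool),
    vis[n]? = some row →
    pvUnv (vis.set n row') + row.count false = pvUnv vis + row'.count false := by
  intro vis
  induction vis with
  | nil => intro n row row' h; simp at h
  | cons r t ih =>
    intro n row row' h
    cases n with
    | zero =>
      simp only [List.getElem?_cons_zero, Option.some.injEq] at h
      subst h
      simp [pvUnv]
      omega
    | succ m =>
      simp only [List.getElem?_cons_succ] at h
      have := ih m row row' h
      simp only [List.set_cons_succ, pvUnv, List.map_cons, List.sum_cons] at *
      omega

theorem pvUnv_visSet_lt (vis : List (List Bool)) (i j : Int)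
    (hi : 0 ≤ i) (hj : 0 ≤ j) (h : pvVisGet vis i j = false) :
    pvUnv (pvVisSet vis i j) + 1 ≤ pvUnv vis := by
  obtain ⟨row, hrow, hfalse⟩ := pvVisGet_false_exists vis i j hi hj h
  have hd : vis.getD i.toNat [] = row := by
    rw [List.getD_eq_getElem?_getD, hrow]
    rfl
  have h1 := pvUnv_set vis i.toNat row (row.set j.toNat true) hrow
  have h2 := pv_count_false_set row j.toNat hfalse
  unfold pvVisSet
  rw [hd]
  omega

-- A's whole step measure is monotone over the direction fold
theorem pvStepDir_meas (N M r c cnt : Int)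
    (s : List (List Bool) × List (List Int) × List (Int × Int × Int)) (dv : Int × Int) :
    4 * pvUnv (pvStepDir N M r c cnt s dv).1 + (pvStepDir N M r c cnt s dv).2.2.length ≤
      4 * pvUnv s.1 + s.2.2.length := by
  simp only [pvStepDir]
  split_ifs with hc
  · exact Nat.le_refl _
  · push_neg at hc
    obtain ⟨h1, h2, _, _, h5, _⟩ := hc
    have hvf : pvVisGet s.1 (r + dv.1) (c + dv.2) = false := by
      cases hx : pvVisGet s.1 (r + dv.1) (c + dv.2)
      · rfl
      · exact absurd hx h5
    have := pvUnv_visSet_lt s.1 (r + dv.1) (c + dv.2) (by omega) (by omega) hvf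
    simp only [List.length_append, List.length_cons, List.length_nil]
    omega

theorem pvDirFold_meas (N M r c cnt : Int)
    (s : List (List Bool) × List (List Int) × List (Int × Int × Int)) :
    4 * pvUnv (pvDirs.foldl (pvStepDir N M r c cnt) s).1 +
        (pvDirs.foldl (pvStepDir N M r c cnt) s).2.2.length ≤
      4 * pvUnv s.1 + s.2.2.length :=
  pv_foldl_mono (fun a => 4 * pvUnv a.1 + a.2.2.length) _ (fun a x => pvStepDir_meas N M r c cnt a x) pvDirs s


theorem pv_filter_len_mono {α : Type} (p q : α → Bool) (h : ∀ a, p a = true → q a = true) :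
    ∀ l : List α, (l.filter p).length ≤ (l.filter q).length := by
  intro l
  induction l with
  | nil => simp
  | cons x xs ih =>
    cases hx : p x with
    | false =>
      rw [List.filter_cons_of_neg (by simp [hx])]
      cases hq : q x with
      | false => rw [List.filter_cons_of_neg (by simp [hq])]; exact ih
      | true => rw [List.filter_cons_of_pos hq]; simp; omega
    | true =>
      rw [List.filter_cons_of_pos hx, List.filter_cons_of_pos (h x hx)]
      simp; omega

theorem pv_countP_strict {α : Type} (l : List α) (p q : α → Bool)
    (hmono : ∀ a, p a = true → q a = true) (k : α) (hk : k ∈ l) (hq : q k = true) (hp : p k = false) :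
    (l.filter p).length + 1 ≤ (l.filter q).length := by
  obtain ⟨l1, l2, rfl⟩ := List.append_of_mem hk
  rw [List.filter_append, List.filter_append, List.length_append, List.length_append,
    List.filter_cons_of_neg (by simp [hp]), List.filter_cons_of_pos hq]
  have h1 := pv_filter_len_mono p q hmono l1
  have h2 := pv_filter_len_mono p q hmono l2
  simp only [List.length_cons]
  omega

theorem pv_mem_zero (grid : List (List Int)) (N M i j : Int)
    (h1 : 0 ≤ i) (h2 : i < N) (h3 : 0 ≤ j) (h4 : j < M) (h5 : pvGGet grid i j = 0) :
    (i, j) ∈ pvZero grid N M := by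
  unfold pvZero
  rw [List.mem_flatMap]
  refine ⟨i, ?_, ?_⟩
  · rw [PySem.List.mem_pyRange_one]; omega
  · rw [List.mem_map]
    refine ⟨j, ?_, rfl⟩
    rw [List.mem_filter, PySem.List.mem_pyRange_one]
    simp [h5]; omega

theorem pvStepDirB_meas (N M : Int) (grid : List (List Int)) (dd : Int)
    (s : PySem.Dict (Int × Int) Int × List (Int × Int)) (nb : Int × Int) :
    pvPot grid N M (pvStepDirB N M grid dd s nb).1 + (pvStepDirB N M grid dd s nb).2.length ≤
      pvPot grid N M s.1 + s.2.length := by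
  unfold pvStepDirB
  split_ifs with hc
  · obtain ⟨h1, h2, h3, h4, h5, h6⟩ := hc
    have hmem : nb ∈ pvZero grid N M := by
      have := pv_mem_zero grid N M nb.1 nb.2 h1 h2 h3 h4 h6
      simpa using this
    have hstrict := pv_countP_strict (pvZero grid N M)
      (fun c => ! (s.1.insert nb dd).contains c) (fun c => ! s.1.contains c)
      (fun a ha => by
        simp only [Bool.not_eq_true'] at ha ⊢
        rw [PySem.Dict.contains_insert] at ha
        cases h : s.1.contains a
        · rfl
        · rw [h] at ha; simp at ha)
      nb hmem (by simp [h5]) (by simp [PySem.Dict.contains_insert_self])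
    unfold pvPot
    simp only [List.length_append, List.length_cons, List.length_nil]
    omega
  · exact Nat.le_refl _

theorem pvLevelB_meas (N M : Int) (grid : List (List Int)) (dd : Int)
    (F : List (Int × Int)) (s : PySem.Dict (Int × Int) Int × List (Int × Int)) :
    pvPot grid N M (F.foldl (pvExpandB N M grid dd) s).1 +
        (F.foldl (pvExpandB N M grid dd) s).2.length ≤
      pvPot grid N M s.1 + s.2.length := by
  refine pv_foldl_mono (fun a => pvPot grid N M a.1 + a.2.length) _ (fun a x => ?_) F s
  exact pv_foldl_mono (fun a => pvPot grid N M a.1 + a.2.length) _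
    (fun a y => pvStepDirB_meas N M grid dd a y) _ a

theorem pv_foldl_rel {α β γ : Type} (R : α → β → Prop) (fA : α → γ → α) (fB : β → γ → β)
    (h : ∀ a b x, R a b → R (fA a x) (fB b x)) :
    ∀ (l : List γ) (a : α) (b : β), R a b → R (l.foldl fA a) (l.foldl fB b) := by
  intro l
  induction l with
  | nil => intro a b hr; exact hr
  | cons x xs ih => intro a b hr; exact ih _ _ (h a b x hr)

-- reading an unrelated cell through a single 2-d write
theorem pv_getset_ne {α : Type} (dflt : α) (l : List (List α)) (w : α) (a b i j : Int)
    (ha : 0 ≤ a) (hb : 0 ≤ b) (hi : 0 ≤ i) (hj : 0 ≤ j) (hne : ¬(a = i ∧ b = j)) :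
    (PySem.List.pyGet? ((PySem.List.pyGet?
        (l.set a.toNat ((l.getD a.toNat []).set b.toNat w)) i).getD []) j).getD dflt
      = (PySem.List.pyGet? ((PySem.List.pyGet? l i).getD []) j).getD dflt := by
  rw [PySem.List.pyGet?_of_nonneg (l.set a.toNat ((l.getD a.toNat []).set b.toNat w)) hi,
      PySem.List.pyGet?_of_nonneg l hi, List.getElem?_set]
  split_ifs with h1 h2
  · have hai : a = i := by omega
    have hbj : b.toNat ≠ j.toNat := by
      have : ¬(b = j) := fun hbj => hne ⟨hai, hbj⟩
      omega
    simp only [Option.getD_some]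
    rw [PySem.List.pyGet?_of_nonneg ((l.getD a.toNat []).set b.toNat w) hj,
        PySem.List.pyGet?_of_nonneg ((l[i.toNat]?).getD []) hj,
        List.getElem?_set, if_neg hbj]
    rw [List.getD_eq_getElem?_getD, h1]
  · have hnone : l[i.toNat]? = none := by rw [List.getElem?_eq_none_iff]; omega
    rw [hnone]
  · rfl

theorem pvGGet_gset_ne (g : List (List Int)) (a b i j v : Int)
    (ha : 0 ≤ a) (hb : 0 ≤ b) (hi : 0 ≤ i) (hj : 0 ≤ j) (hne : ¬(a = i ∧ b = j)) :
    pvGGet (pvGSet g a b v) i j = pvGGet g i j := by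
  unfold pvGGet pvGSet
  exact pv_getset_ne 0 g v a b i j ha hb hi hj hne

theorem pvVisGet_visSet_ne (vis : List (List Bool)) (a b i j : Int)
    (ha : 0 ≤ a) (hb : 0 ≤ b) (hi : 0 ≤ i) (hj : 0 ≤ j) (hne : ¬(a = i ∧ b = j)) :
    pvVisGet (pvVisSet vis a b) i j = pvVisGet vis i j := by
  unfold pvVisGet pvVisSet
  exact pv_getset_ne true vis true a b i j ha hb hi hj hne

theorem pvVisGet_visSet_self (vis : List (List Bool)) (i j : Int)
    (hi : 0 ≤ i) (hj : 0 ≤ j) (hlen : i.toNat < vis.length)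
    (hrow : ∀ row ∈ vis, j.toNat < row.length) :
    pvVisGet (pvVisSet vis i j) i j = true := by
  unfold pvVisGet pvVisSet
  rw [PySem.List.pyGet?_of_nonneg _ hi, List.getElem?_set, if_pos rfl, if_pos hlen]
  simp only [Option.getD_some]
  rw [PySem.List.pyGet?_of_nonneg _ hj]
  have hmem : vis.getD i.toNat [] ∈ vis := by
    rw [List.getD_eq_getElem?_getD, List.getElem?_eq_getElem hlen]
    simp only [Option.getD_some]
    exact List.getElem_mem hlen
  rw [List.getElem?_set, if_pos rfl, if_pos (hrow _ hmem)]
  rfl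

-- an unwritten cell reads the same through a whole write-back
theorem pvWrite_gget (i j : Int) (hi : 0 ≤ i) (hj : 0 ≤ j) :
    ∀ (items : List ((Int × Int) × Int)) (g0 : List (List Int)),
      (∀ p ∈ items, 0 ≤ p.1.1 ∧ 0 ≤ p.1.2 ∧ ¬(p.1.1 = i ∧ p.1.2 = j)) →
      pvGGet (pvWrite g0 items) i j = pvGGet g0 i j := by
  intro items
  induction items with
  | nil => intro g0 _; rfl
  | cons p t ih =>
    intro g0 hp
    have hph := hp p (by simp)
    have hstep : pvWrite g0 (p :: t) = pvWrite (pvGSet g0 p.1.1 p.1.2 p.2) t := rfl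
    rw [hstep, ih _ (fun q hq => hp q (by simp [hq]))]
    exact pvGGet_gset_ne g0 p.1.1 p.1.2 i j p.2 hph.1 hph.2.1 hi hj hph.2.2

theorem pvWrite_append (g0 : List (List Int)) (items : List ((Int × Int) × Int))
    (k : Int × Int) (v : Int) :
    pvWrite g0 (items ++ [(k, v)]) = pvGSet (pvWrite g0 items) k.1 k.2 v := by
  simp [pvWrite, List.foldl_append]

-- an unvisited in-bounds cell of A's grid still holds its original value
theorem pvInv_gget (N M : Int) (g0 : List (List Int)) (vis : List (List Bool))
    (dist : PySem.Dict (Int × Int) Int) (g : List (List Int))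
    (hInv : pvInv N M g0 vis dist g) (i j : Int) (hi : 0 ≤ i) (hj : 0 ≤ j)
    (hfresh : dist.contains (i, j) = false) :
    pvGGet g i j = pvGGet g0 i j := by
  obtain ⟨hlen, hrows, hvis, hg, hkeys⟩ := hInv
  rw [hg]
  apply pvWrite_gget i j hi hj
  intro p hp
  have hk := PySem.Dict.mem_keys_of_mem_items dist hp
  have hbd := hkeys p.1 hk
  refine ⟨hbd.1, hbd.2.2.1, ?_⟩
  rintro ⟨e1, e2⟩
  have hpk : p.1 = (i, j) := Prod.ext e1 e2
  rw [hpk] at hk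
  have := (PySem.Dict.contains_iff_mem_keys dist (i, j)).mpr hk
  rw [hfresh] at this
  exact Bool.false_ne_true this

-- a fresh in-bounds write preserves the invariant
theorem pvInv_insert (N M : Int) (g0 : List (List Int)) (vis : List (List Bool))
    (dist : PySem.Dict (Int × Int) Int) (g : List (List Int)) (i j v : Int)
    (hInv : pvInv N M g0 vis dist g)
    (h1 : 0 ≤ i) (h2 : i < N) (h3 : 0 ≤ j) (h4 : j < M)
    (hfresh : dist.contains (i, j) = false) :
    pvInv N M g0 (pvVisSet vis i j) (dist.insert (i, j) v) (pvGSet g i j v) := by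
  obtain ⟨hlen, hrows, hvis, hg, hkeys⟩ := hInv
  have hitoNat : i.toNat < vis.length := by rw [hlen]; omega
  refine ⟨?_, ?_, ?_, ?_, ?_⟩
  · simp only [pvVisSet, List.length_set]; exact hlen
  · intro row hrow
    rcases List.mem_or_eq_of_mem_set hrow with hmem | heq
    · exact hrows row hmem
    · subst heq
      rw [List.length_set]
      have hmem2 : vis.getD i.toNat [] ∈ vis := by
        rw [List.getD_eq_getElem?_getD, List.getElem?_eq_getElem hitoNat]
        simp only [Option.getD_some]
        exact List.getElem_mem hitoNat
      exact hrows _ hmem2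
  · intro i' j' hi1 hi2 hj1 hj2
    by_cases hee : (i', j') = (i, j)
    · rw [Prod.mk.injEq] at hee
      obtain ⟨rfl, rfl⟩ := hee
      rw [pvVisGet_visSet_self vis i' j' hi1 hj1 (by rw [hlen]; omega)
        (fun row hr => by rw [hrows row hr]; omega)]
      rw [PySem.Dict.contains_insert_self]
    · have hne' : ¬(i = i' ∧ j = j') := by
        rintro ⟨e1, e2⟩
        exact hee (by rw [Prod.mk.injEq]; exact ⟨e1.symm, e2.symm⟩)
      rw [pvVisGet_visSet_ne vis i j i' j' h1 h3 hi1 hj1 hne']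
      rw [hvis i' j' hi1 hi2 hj1 hj2]
      rw [PySem.Dict.contains_insert]
      have hbe : ((i', j') == (i, j)) = false := beq_eq_false_iff_ne.mpr hee
      rw [hbe, Bool.false_or]
  · rw [PySem.Dict.items_insert_of_not_contains dist v hfresh]
    rw [pvWrite_append, hg]
  · intro k hk
    rcases (PySem.Dict.mem_keys_insert dist (i, j) k v).mp hk with rfl | hk'
    · exact ⟨h1, h2, h3, h4⟩
    · exact hkeys k hk'

-- the step relation between A's direction loop and B's neighbour loop
def pvRel (N M cnt : Int) (g0 : List (List Int))
    (a : List (List Bool) × List (List Int) × List (Int × Int × Int))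
    (b : PySem.Dict (Int × Int) Int × List (Int × Int)) : Prop :=
  pvInv N M g0 a.1 b.1 a.2.1 ∧ a.2.2 = b.2.map (fun e => (e.1, e.2, cnt + 1))

theorem pvStep_corr (N M r c cnt : Int) (g0 : List (List Int)) (dv : Int × Int)
    (a : List (List Bool) × List (List Int) × List (Int × Int × Int))
    (b : PySem.Dict (Int × Int) Int × List (Int × Int))
    (h : pvRel N M cnt g0 a b) :
    pvRel N M cnt g0 (pvStepDir N M r c cnt a dv)
      (pvStepDirB N M g0 (cnt + 1) b (r + dv.1, c + dv.2)) := by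
  obtain ⟨hInv, hacc⟩ := h
  have hInv' := hInv
  obtain ⟨hlen, hrows, hvis, hg, hkeys⟩ := hInv'
  simp only [pvStepDir, pvStepDirB]
  by_cases hin : 0 ≤ r + dv.1 ∧ r + dv.1 < N ∧ 0 ≤ c + dv.2 ∧ c + dv.2 < M
  · obtain ⟨g1, g2, g3, g4⟩ := hin
    by_cases hcont : b.1.contains (r + dv.1, c + dv.2) = true
    · have hA : (r + dv.1 < 0 ∨ c + dv.2 < 0 ∨ N ≤ r + dv.1 ∨ M ≤ c + dv.2 ∨
          pvVisGet a.1 (r + dv.1) (c + dv.2) = true ∨ pvGGet a.2.1 (r + dv.1) (c + dv.2) ≠ 0) := by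
        right; right; right; right; left
        rw [hvis _ _ g1 g2 g3 g4]; exact hcont
      have hB : ¬(0 ≤ r + dv.1 ∧ r + dv.1 < N ∧ 0 ≤ c + dv.2 ∧ c + dv.2 < M ∧
          b.1.contains (r + dv.1, c + dv.2) = false ∧ pvGGet g0 (r + dv.1) (c + dv.2) = 0) := by
        rintro ⟨_, _, _, _, hc5, _⟩
        rw [hcont] at hc5
        simp at hc5
      rw [if_pos hA, if_neg hB]
      exact ⟨hInv, hacc⟩
    · have hcontf : b.1.contains (r + dv.1, c + dv.2) = false := by
        cases h' : b.1.contains (r + dv.1, c + dv.2)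
        · rfl
        · exact absurd h' hcont
      have hgg : pvGGet a.2.1 (r + dv.1) (c + dv.2) = pvGGet g0 (r + dv.1) (c + dv.2) :=
        pvInv_gget N M g0 a.1 b.1 a.2.1 hInv _ _ (by omega) (by omega) hcontf
      by_cases hz : pvGGet g0 (r + dv.1) (c + dv.2) = 0
      · have hA : ¬(r + dv.1 < 0 ∨ c + dv.2 < 0 ∨ N ≤ r + dv.1 ∨ M ≤ c + dv.2 ∨
            pvVisGet a.1 (r + dv.1) (c + dv.2) = true ∨ pvGGet a.2.1 (r + dv.1) (c + dv.2) ≠ 0) := by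
          rintro (hh | hh | hh | hh | hh | hh)
          · omega
          · omega
          · omega
          · omega
          · rw [hvis _ _ g1 g2 g3 g4, hcontf] at hh; exact Bool.false_ne_true hh
          · exact hh (by rw [hgg]; exact hz)
        have hB : (0 ≤ r + dv.1 ∧ r + dv.1 < N ∧ 0 ≤ c + dv.2 ∧ c + dv.2 < M ∧
            b.1.contains (r + dv.1, c + dv.2) = false ∧ pvGGet g0 (r + dv.1) (c + dv.2) = 0) :=
          ⟨g1, g2, g3, g4, hcontf, hz⟩
        rw [if_neg hA, if_pos hB]
        constructor
        · exact pvInv_insert N M g0 a.1 b.1 a.2.1 (r + dv.1) (c + dv.2) (cnt + 1)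
            hInv g1 g2 g3 g4 hcontf
        · simp [hacc]
      · have hA : (r + dv.1 < 0 ∨ c + dv.2 < 0 ∨ N ≤ r + dv.1 ∨ M ≤ c + dv.2 ∨
            pvVisGet a.1 (r + dv.1) (c + dv.2) = true ∨ pvGGet a.2.1 (r + dv.1) (c + dv.2) ≠ 0) := by
          right; right; right; right; right
          rw [hgg]; exact hz
        have hB : ¬(0 ≤ r + dv.1 ∧ r + dv.1 < N ∧ 0 ≤ c + dv.2 ∧ c + dv.2 < M ∧
            b.1.contains (r + dv.1, c + dv.2) = false ∧ pvGGet g0 (r + dv.1) (c + dv.2) = 0) := by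
          rintro ⟨_, _, _, _, _, hh⟩
          exact hz hh
        rw [if_pos hA, if_neg hB]
        exact ⟨hInv, hacc⟩
  · have hor : r + dv.1 < 0 ∨ c + dv.2 < 0 ∨ N ≤ r + dv.1 ∨ M ≤ c + dv.2 := by omega
    have hA : (r + dv.1 < 0 ∨ c + dv.2 < 0 ∨ N ≤ r + dv.1 ∨ M ≤ c + dv.2 ∨
        pvVisGet a.1 (r + dv.1) (c + dv.2) = true ∨ pvGGet a.2.1 (r + dv.1) (c + dv.2) ≠ 0) := by
      rcases hor with hh | hh | hh | hh
      · exact Or.inl hh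
      · exact Or.inr (Or.inl hh)
      · exact Or.inr (Or.inr (Or.inl hh))
      · exact Or.inr (Or.inr (Or.inr (Or.inl hh)))
    have hB : ¬(0 ≤ r + dv.1 ∧ r + dv.1 < N ∧ 0 ≤ c + dv.2 ∧ c + dv.2 < M ∧
        b.1.contains (r + dv.1, c + dv.2) = false ∧ pvGGet g0 (r + dv.1) (c + dv.2) = 0) := by
      rintro ⟨b1, b2, b3, b4, _, _⟩
      exact hin ⟨b1, b2, b3, b4⟩
    rw [if_pos hA, if_neg hB]
    exact ⟨hInv, hacc⟩

theorem pvCell_corr (N M cnt : Int) (g0 : List (List Int)) (cell : Int × Int)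
    (a : List (List Bool) × List (List Int) × List (Int × Int × Int))
    (b : PySem.Dict (Int × Int) Int × List (Int × Int))
    (h : pvRel N M cnt g0 a b) :
    pvRel N M cnt g0 (pvDirs.foldl (pvStepDir N M cell.1 cell.2 cnt) a)
      (pvExpandB N M g0 (cnt + 1) b cell) := by
  unfold pvExpandB
  have hl : [(cell.1 + 1, cell.2), (cell.1, cell.2 + 1), (cell.1 - 1, cell.2), (cell.1, cell.2 - 1)] =
      pvDirs.map (fun dv => (cell.1 + dv.1, cell.2 + dv.2)) := by
    simp [pvDirs, Prod.ext_iff] <;> omega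
  rw [hl, List.foldl_map]
  exact pv_foldl_rel _ _ _ (fun a b dv h => pvStep_corr N M cell.1 cell.2 cnt g0 dv a b h) pvDirs a b h

-- A's step only appends to the queue accumulator
theorem pvDirFold_shift (N M r c cnt : Int) :
    ∀ (l : List (Int × Int)) (s : List (List Bool) × List (List Int) × List (Int × Int × Int)),
      l.foldl (pvStepDir N M r c cnt) s =
        ((l.foldl (pvStepDir N M r c cnt) (s.1, s.2.1, [])).1,
         (l.foldl (pvStepDir N M r c cnt) (s.1, s.2.1, [])).2.1,
         s.2.2 ++ (l.foldl (pvStepDir N M r c cnt) (s.1, s.2.1, [])).2.2) := by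
  intro l
  induction l with
  | nil => intro s; simp
  | cons dv t ih =>
    intro s
    rw [List.foldl_cons, List.foldl_cons]
    have h0 : pvStepDir N M r c cnt s dv =
        ((pvStepDir N M r c cnt (s.1, s.2.1, []) dv).1,
         (pvStepDir N M r c cnt (s.1, s.2.1, []) dv).2.1,
         s.2.2 ++ (pvStepDir N M r c cnt (s.1, s.2.1, []) dv).2.2) := by
      simp only [pvStepDir]
      split_ifs <;> simp
    rw [h0, ih ((pvStepDir N M r c cnt (s.1, s.2.1, []) dv).1,
          (pvStepDir N M r c cnt (s.1, s.2.1, []) dv).2.1,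
          s.2.2 ++ (pvStepDir N M r c cnt (s.1, s.2.1, []) dv).2.2),
        ih (pvStepDir N M r c cnt (s.1, s.2.1, []) dv)]
    simp [List.append_assoc]

-- A consumes the queue level by level, one fuel unit per popped cell
theorem pvLevelA (N M d : Int) :
    ∀ (F : List (Int × Int)) (acc : List (Int × Int × Int)) (vis : List (List Bool))
      (g : List (List Int)) (fuel : Nat),
      pvBfsA N M (fuel + F.length) (F.map (fun e => (e.1, e.2, d)) ++ acc) vis g =
        pvBfsA N M fuel
          (F.foldl (fun s cell => pvDirs.foldl (pvStepDir N M cell.1 cell.2 d) s) (vis, g, acc)).2.2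
          (F.foldl (fun s cell => pvDirs.foldl (pvStepDir N M cell.1 cell.2 d) s) (vis, g, acc)).1
          (F.foldl (fun s cell => pvDirs.foldl (pvStepDir N M cell.1 cell.2 d) s) (vis, g, acc)).2.1 := by
  intro F
  induction F with
  | nil => intro acc vis g fuel; simp
  | cons e F' ih =>
    intro acc vis g fuel
    rw [List.map_cons, List.cons_append, List.length_cons,
      show fuel + (F'.length + 1) = (fuel + F'.length) + 1 from by omega]
    simp only [pvBfsA]
    rw [List.append_assoc]
    rw [ih (acc ++ (pvDirs.foldl (pvStepDir N M e.1 e.2 d) (vis, g, [])).2.2)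
        (pvDirs.foldl (pvStepDir N M e.1 e.2 d) (vis, g, [])).1
        (pvDirs.foldl (pvStepDir N M e.1 e.2 d) (vis, g, [])).2.1 fuel]
    rw [List.foldl_cons]
    have hcell : pvDirs.foldl (pvStepDir N M e.1 e.2 d) (vis, g, acc) =
        ((pvDirs.foldl (pvStepDir N M e.1 e.2 d) (vis, g, [])).1,
         (pvDirs.foldl (pvStepDir N M e.1 e.2 d) (vis, g, [])).2.1,
         acc ++ (pvDirs.foldl (pvStepDir N M e.1 e.2 d) (vis, g, [])).2.2) := by
      have := pvDirFold_shift N M e.1 e.2 d pvDirs (vis, g, acc)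
      simpa using this
    rw [hcell]

theorem pvLevelA_meas (N M d : Int) (F : List (Int × Int)) (vis : List (List Bool))
    (g : List (List Int)) :
    4 * pvUnv (F.foldl (fun s cell => pvDirs.foldl (pvStepDir N M cell.1 cell.2 d) s) (vis, g, [])).1 +
        (F.foldl (fun s cell => pvDirs.foldl (pvStepDir N M cell.1 cell.2 d) s) (vis, g, [])).2.2.length ≤
      4 * pvUnv vis := by
  have := pv_foldl_mono (fun a => 4 * pvUnv a.1 + a.2.2.length)
    (fun s cell => pvDirs.foldl (pvStepDir N M cell.1 cell.2 d) s)
    (fun a x => pvDirFold_meas N M x.1 x.2 d a) F (vis, g, [])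
  simpa using this

-- main simulation: A's queue loop tracks B's level loop (fuel never runs out)
theorem pvMain (N M : Int) (g0 : List (List Int)) :
    ∀ (n fuelA fuelB : Nat) (F : List (Int × Int)) (d : Int) (vis : List (List Bool))
      (dist : PySem.Dict (Int × Int) Int) (g : List (List Int)),
      4 * pvUnv vis + F.length ≤ n →
      4 * pvUnv vis + F.length ≤ fuelA →
      pvPot g0 N M dist + 1 ≤ fuelB →
      pvInv N M g0 vis dist g →
      pvBfsA N M fuelA (F.map (fun e => (e.1, e.2, d))) vis g =
        pvWrite g0 (pvBfsB N M g0 fuelB F d dist).items := by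
  intro n
  induction n with
  | zero =>
    intro fuelA fuelB F d vis dist g hb _ _ hInv
    have hF : F = [] := by
      cases F with
      | nil => rfl
      | cons x xs => simp at hb
    subst hF
    simp only [List.map_nil]
    rw [show pvBfsA N M fuelA [] vis g = g from by simp [pvBfsA]]
    rw [show pvBfsB N M g0 fuelB [] d dist = dist from by simp [pvBfsB]]
    exact hInv.2.2.2.1
  | succ n ih =>
    intro fuelA fuelB F d vis dist g hb hfa hfb hInv
    cases F with
    | nil =>
      simp only [List.map_nil]
      rw [show pvBfsA N M fuelA [] vis g = g from by simp [pvBfsA]]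
      rw [show pvBfsB N M g0 fuelB [] d dist = dist from by simp [pvBfsB]]
      exact hInv.2.2.2.1
    | cons e F' =>
      have hrel0 : pvRel N M d g0 (vis, g, []) (dist, []) := ⟨hInv, rfl⟩
      have hrel := pv_foldl_rel (pvRel N M d g0)
        (fun s cell => pvDirs.foldl (pvStepDir N M cell.1 cell.2 d) s)
        (pvExpandB N M g0 (d + 1))
        (fun a b x hx => pvCell_corr N M d g0 x a b hx) (e :: F') _ _ hrel0
      obtain ⟨hInv', hacc⟩ := hrel
      have hmeas := pvLevelA_meas N M d (e :: F') vis g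
      have hpot := pvLevelB_meas N M g0 (d + 1) (e :: F') (dist, [])
      obtain ⟨fA, rfl⟩ : ∃ fA, fuelA = fA + (e :: F').length := by
        refine ⟨fuelA - (e :: F').length, ?_⟩
        simp only [List.length_cons] at hfa ⊢
        omega
      obtain ⟨fB, rfl⟩ : ∃ fB, fuelB = fB + 1 := ⟨fuelB - 1, by omega⟩
      have hBcons : pvBfsB N M g0 (fB + 1) (e :: F') d dist =
          pvBfsB N M g0 fB ((e :: F').foldl (pvExpandB N M g0 (d + 1)) (dist, [])).2 (d + 1)
            ((e :: F').foldl (pvExpandB N M g0 (d + 1)) (dist, [])).1 := by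
        simp only [pvBfsB]
      rw [hBcons]
      rw [show (e :: F').map (fun e => (e.1, e.2, d)) =
            (e :: F').map (fun e => (e.1, e.2, d)) ++ [] from (List.append_nil _).symm]
      rw [pvLevelA N M d (e :: F') [] vis g fA]
      rw [hacc]
      cases hnext : ((e :: F').foldl (pvExpandB N M g0 (d + 1)) (dist, [])).2 with
      | nil =>
        rw [show pvBfsB N M g0 fB []
              (d + 1) ((e :: F').foldl (pvExpandB N M g0 (d + 1)) (dist, [])).1 =
              ((e :: F').foldl (pvExpandB N M g0 (d + 1)) (dist, [])).1 from by simp [pvBfsB]]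
        simp only [List.map_nil]
        rw [show ∀ (v : List (List Bool)) (gg : List (List Int)), pvBfsA N M fA [] v gg = gg
              from fun v gg => by simp [pvBfsA]]
        exact hInv'.2.2.2.1
      | cons y ys =>
        rw [← hnext]
        refine ih fA fB _ (d + 1) _ _ _ ?_ ?_ ?_ hInv'
        · have hlen2 : ((e :: F').foldl (fun s cell =>
                pvDirs.foldl (pvStepDir N M cell.1 cell.2 d) s) (vis, g, [])).2.2.length =
              ((e :: F').foldl (pvExpandB N M g0 (d + 1)) (dist, [])).2.length := by
            rw [hacc]; simp
          simp only [List.length_cons] at hb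
          omega
        · have hlen2 : ((e :: F').foldl (fun s cell =>
                pvDirs.foldl (pvStepDir N M cell.1 cell.2 d) s) (vis, g, [])).2.2.length =
              ((e :: F').foldl (pvExpandB N M g0 (d + 1)) (dist, [])).2.length := by
            rw [hacc]; simp
          simp only [List.length_cons] at hfa
          omega
        · have hne : ((e :: F').foldl (pvExpandB N M g0 (d + 1)) (dist, [])).2.length ≠ 0 := by
            rw [hnext]; simp
          simp only [List.length_nil] at hpot
          omega

-- ===== the initialisation phase =====
def pvInitStep (st : List (List Bool) × List (Int × Int × Int) × List (List Int))
    (ij : Int × Int) : List (List Bool) × List (Int × Int × Int) × List (List Int) :=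
  if pvGGet st.2.2 ij.1 ij.2 == 1 then
    (pvVisSet st.1 ij.1 ij.2, st.2.1 ++ [(ij.1, ij.2, (0 : Int))], pvGSet st.2.2 ij.1 ij.2 0)
  else st

theorem pv_foldl_pairs {σ : Type} (f : σ → (Int × Int) → σ) (is js : List Int) :
    ∀ st : σ, (is.flatMap (fun i => js.map (fun j => (i, j)))).foldl f st =
      is.foldl (fun st i => js.foldl (fun st j => f st (i, j)) st) st := by
  induction is with
  | nil => intro st; simp
  | cons i it ih =>
    intro st
    simp only [List.flatMap_cons, List.foldl_append, List.foldl_map, List.foldl_cons]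
    rw [ih]

theorem pvInitA_eq_pairs (N M : Int) (st : List (List Bool) × List (Int × Int × Int) × List (List Int)) :
    pvInitA N M st =
      ((PySem.List.pyRange 0 N 1).flatMap (fun i =>
        (PySem.List.pyRange 0 M 1).map (fun j => (i, j)))).foldl pvInitStep st := by
  rw [pv_foldl_pairs]; rfl

theorem pvInit_corr (N M : Int) (g0 : List (List Int)) :
    ∀ (l : List (Int × Int)) (vis : List (List Bool)) (dist : PySem.Dict (Int × Int) Int)
      (g : List (List Int)) (q : List (Int × Int × Int)),
      pvInv N M g0 vis dist g →
      l.Nodup →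
      (∀ ij ∈ l, dist.contains ij = false) →
      (∀ ij ∈ l, 0 ≤ ij.1 ∧ ij.1 < N ∧ 0 ≤ ij.2 ∧ ij.2 < M) →
      (l.foldl pvInitStep (vis, q, g)).2.1 =
          q ++ (l.filter (fun ij => pvGGet g0 ij.1 ij.2 == 1)).map (fun ij => (ij.1, ij.2, (0 : Int))) ∧
      pvInv N M g0 (l.foldl pvInitStep (vis, q, g)).1
        ((l.filter (fun ij => pvGGet g0 ij.1 ij.2 == 1)).foldl (fun d c => d.insert c (0 : Int)) dist)
        (l.foldl pvInitStep (vis, q, g)).2.2 := by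
  intro l
  induction l with
  | nil =>
    intro vis dist g q hInv _ _ _
    exact ⟨by simp, by simpa using hInv⟩
  | cons ij t ih =>
    intro vis dist g q hInv hnd hfresh hbnd
    have hnd' := List.nodup_cons.mp hnd
    have hfij : dist.contains ij = false := hfresh ij (by simp)
    have hbij := hbnd ij (by simp)
    have hgg : pvGGet g ij.1 ij.2 = pvGGet g0 ij.1 ij.2 :=
      pvInv_gget N M g0 vis dist g hInv ij.1 ij.2 hbij.1 hbij.2.2.1 (by simpa using hfij)
    rw [List.foldl_cons]
    by_cases h1 : pvGGet g0 ij.1 ij.2 = 1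
    · have hstep : pvInitStep (vis, q, g) ij =
          (pvVisSet vis ij.1 ij.2, q ++ [(ij.1, ij.2, (0 : Int))], pvGSet g ij.1 ij.2 0) := by
        simp only [pvInitStep]
        rw [if_pos (by rw [hgg]; simp [h1])]
      rw [hstep]
      have hInv1 : pvInv N M g0 (pvVisSet vis ij.1 ij.2) (dist.insert (ij.1, ij.2) 0)
          (pvGSet g ij.1 ij.2 0) :=
        pvInv_insert N M g0 vis dist g ij.1 ij.2 0 hInv hbij.1 hbij.2.1 hbij.2.2.1 hbij.2.2.2
          (by simpa using hfij)
      have hfresh' : ∀ kj ∈ t, (dist.insert (ij.1, ij.2) 0).contains kj = false := by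
        intro kj hkj
        rw [PySem.Dict.contains_insert]
        have hne : kj ≠ (ij.1, ij.2) := by
          intro hcon
          apply hnd'.1
          rw [hcon] at hkj
          exact hkj
        rw [beq_eq_false_iff_ne.mpr hne, Bool.false_or]
        exact hfresh kj (by simp [hkj])
      obtain ⟨hq, hI⟩ := ih (pvVisSet vis ij.1 ij.2) (dist.insert (ij.1, ij.2) 0)
        (pvGSet g ij.1 ij.2 0) (q ++ [(ij.1, ij.2, (0 : Int))]) hInv1 hnd'.2 hfresh'
        (fun kj hkj => hbnd kj (by simp [hkj]))
      constructor
      · rw [hq, List.filter_cons_of_pos (by simp [h1]), List.map_cons, List.append_assoc]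
        rfl
      · rw [List.filter_cons_of_pos (by simp [h1]), List.foldl_cons]
        exact hI
    · have hstep : pvInitStep (vis, q, g) ij = (vis, q, g) := by
        simp only [pvInitStep]
        rw [if_neg (by rw [hgg]; simp [h1])]
      rw [hstep, List.filter_cons_of_neg (by simp [h1])]
      exact ih vis dist g q hInv hnd'.2 (fun kj hkj => hfresh kj (by simp [hkj]))
        (fun kj hkj => hbnd kj (by simp [hkj]))

theorem pv_pairs_nodup (is js : List Int) (h1 : is.Nodup) (h2 : js.Nodup) :
    (is.flatMap (fun i => js.map (fun j => (i, j)))).Nodup := by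
  induction is with
  | nil => simp
  | cons i it ih =>
    have h1' := List.nodup_cons.mp h1
    rw [List.flatMap_cons, List.nodup_append]
    refine ⟨List.Nodup.map (fun a b hab => congrArg Prod.snd hab) h2, ih h1'.2, ?_⟩
    intro a ha b hb hab
    subst hab
    rw [List.mem_map] at ha
    obtain ⟨j, _, rfl⟩ := ha
    rw [List.mem_flatMap] at hb
    obtain ⟨i', hi', hmem⟩ := hb
    rw [List.mem_map] at hmem
    obtain ⟨j', _, heq⟩ := hmem
    rw [Prod.mk.injEq] at heq
    obtain ⟨rfl, rfl⟩ := heq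
    exact h1'.1 hi'

theorem pv_sources_eq (grid : List (List Int)) (N M : Int) :
    ((PySem.List.pyRange 0 N 1).flatMap (fun i =>
        (PySem.List.pyRange 0 M 1).map (fun j => (i, j)))).filter
      (fun ij => pvGGet grid ij.1 ij.2 == 1) = pvSources N M grid := by
  unfold pvSources
  have hgen : ∀ is : List Int,
      (is.flatMap (fun i => (PySem.List.pyRange 0 M 1).map (fun j => (i, j)))).filter
          (fun ij => pvGGet grid ij.1 ij.2 == 1) =
        is.flatMap (fun i =>
          ((PySem.List.pyRange 0 M 1).filter (fun j => pvGGet grid i j == 1)).map (fun j => (i, j))) := by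
    intro is
    induction is with
    | nil => rfl
    | cons i it ih =>
      rw [List.flatMap_cons, List.flatMap_cons, List.filter_append, ih, List.filter_map]
      rfl
  exact hgen _

theorem pvInv_init (grid : List (List Int)) :
    pvInv (grid.length : Int) ((((PySem.List.pyGet? grid 0).getD []).length : Int)) grid
      (List.replicate grid.length (List.replicate ((PySem.List.pyGet? grid 0).getD []).length false))
      PySem.Dict.empty grid := by
  refine ⟨?_, ?_, ?_, ?_, ?_⟩
  · simp
  · intro row hrow
    rw [List.eq_of_mem_replicate hrow]
    simp
  · intro i j hi1 hi2 hj1 hj2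
    rw [PySem.Dict.contains_empty]
    unfold pvVisGet
    rw [PySem.List.pyGet?_of_nonneg _ hi1, List.getElem?_replicate,
      if_pos (by omega : i.toNat < grid.length)]
    simp only [Option.getD_some]
    rw [PySem.List.pyGet?_of_nonneg _ hj1, List.getElem?_replicate,
      if_pos (by omega : j.toNat < ((PySem.List.pyGet? grid 0).getD []).length)]
    rfl
  · rfl
  · intro k hk
    rw [PySem.Dict.keys_empty] at hk
    simp at hk

-- ===== VERDICT (by name: the statement is the Claim_ definition above) =====
theorem nearestCell_spec : Claim_equal_nearestCell := by
  unfold Claim_equal_nearestCell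
  intro grid _ _
  unfold Spec_nearestCell nearestCell nearestCell_alt
  dsimp only
  rw [pvInitA_eq_pairs]
  obtain ⟨hq, hI⟩ := pvInit_corr (grid.length : Int)
    ((((PySem.List.pyGet? grid 0).getD []).length : Int)) grid
    ((PySem.List.pyRange 0 (grid.length : Int) 1).flatMap (fun i =>
      (PySem.List.pyRange 0 ((((PySem.List.pyGet? grid 0).getD []).length : Int)) 1).map (fun j => (i, j))))
    (List.replicate grid.length (List.replicate ((PySem.List.pyGet? grid 0).getD []).length false))
    PySem.Dict.empty grid []
    (pvInv_init grid)
    (pv_pairs_nodup _ _ (PySem.List.nodup_pyRange_one _ _) (PySem.List.nodup_pyRange_one _ _))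
    (fun ij _ => PySem.Dict.contains_empty ij)
    (fun ij hij => by
      rw [List.mem_flatMap] at hij
      obtain ⟨i, hi, hj⟩ := hij
      rw [List.mem_map] at hj
      obtain ⟨j, hjm, rfl⟩ := hj
      rw [PySem.List.mem_pyRange_one] at hi hjm
      exact ⟨hi.1, hi.2, hjm.1, hjm.2⟩)
  rw [List.nil_append] at hq
  rw [pv_sources_eq grid (grid.length : Int)
    ((((PySem.List.pyGet? grid 0).getD []).length : Int))] at hq hI
  rw [hq]
  refine pvMain (grid.length : Int) ((((PySem.List.pyGet? grid 0).getD []).length : Int)) grid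
    (4 * pvUnv (((PySem.List.pyRange 0 (grid.length : Int) 1).flatMap (fun i =>
        (PySem.List.pyRange 0 ((((PySem.List.pyGet? grid 0).getD []).length : Int)) 1).map
          (fun j => (i, j)))).foldl pvInitStep
        (List.replicate grid.length
          (List.replicate ((PySem.List.pyGet? grid 0).getD []).length false), [], grid)).1 +
      (pvSources (grid.length : Int) ((((PySem.List.pyGet? grid 0).getD []).length : Int)) grid).length)
    _ _
    (pvSources (grid.length : Int) ((((PySem.List.pyGet? grid 0).getD []).length : Int)) grid)
    0 _ _ _ ?_ ?_ ?_ hI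
  · exact Nat.le_refl _
  · simp
  · exact Nat.le_refl _
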